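-- pv_equiv track=rewrite | github.com/errogtr/AoC2023 | day13/solution.py | symmetry
-- ===== SOURCE A (Python) =====
-- def symmetry(p, skip=None):
--     N = len(p)
--     for i in range(1, N):
--         if skip is not None and i == skip:
--             continue
--         if all(p[i - j - 1] == p[i + j] for j in range(min(i, N - i))):
--             return i
--     return 0
-- ===== SOURCE B (Python) =====
-- def symmetry(p, skip=None):
--     # Manacher-style scan over boundary (even) centers: rad[i] is the exact
--     # reflection depth at boundary i, computed in O(N) total comparisons by
--     # reusing the mirrored radius inside the current rightmost palindrome.
--     N = len(p)
--     rad = [0] * (N + 1)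
--     c, r = 0, 0
--     for i in range(1, N):
--         k = 0
--         if i < r:
--             k = min(rad[2 * c - i], r - i)
--         while i - k - 1 >= 0 and i + k < N and p[i - k - 1] == p[i + k]:
--             k += 1
--         rad[i] = k
--         if i + k > r:
--             c, r = i, i + k
--     for i in range(1, N):
--         if skip is not None and i == skip:
--             continue
--         if rad[i] >= min(i, N - i):
--             return i
--     return 0
-- ===== Notes on version B (the rewrite author's own statement) =====
-- stated objective: faster
-- what changed: Replaces the per-axis O(N) rescans with a Manacher-style scan that computes the exact reflection depth of every boundary in O(N) total row comparisons by reusing the mirrored radius inside the rightmost known palindrome, then picks the first qualifying axis by table lookup.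
import Mathlib
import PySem

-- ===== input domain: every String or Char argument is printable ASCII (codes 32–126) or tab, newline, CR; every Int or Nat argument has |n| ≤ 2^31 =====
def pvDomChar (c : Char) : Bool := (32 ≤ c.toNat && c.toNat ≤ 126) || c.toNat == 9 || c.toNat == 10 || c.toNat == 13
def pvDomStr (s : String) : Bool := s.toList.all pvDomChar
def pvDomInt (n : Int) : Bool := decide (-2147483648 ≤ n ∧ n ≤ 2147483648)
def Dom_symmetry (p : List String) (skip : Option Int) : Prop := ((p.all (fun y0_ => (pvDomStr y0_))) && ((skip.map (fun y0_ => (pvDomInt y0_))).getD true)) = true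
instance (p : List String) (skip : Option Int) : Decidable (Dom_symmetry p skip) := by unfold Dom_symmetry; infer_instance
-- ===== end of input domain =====

-- B replaces A's per-axis rescans by a Manacher-style even-center radius scan
-- (objective: faster — O(N) total row comparisons instead of O(N^2)).
-- Both functions are total: every index p[i-j-1], p[i+j] with j < min(i, N-i)
-- is in range, so plain List.getD with default "" is exact here.
-- Loops are ported as structural recursion on a fuel counting the remaining
-- iterations (fuel = N always suffices: i increases / k increases each step).

-- ===== PORT A =====
-- for i in range(1, N): skip test; all(p[i-j-1] == p[i+j] for j in range(min(i, N-i)))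
def symA_loop (p : List String) (skip : Option Int) (N : Nat) : Nat → Nat → Int
  | 0, _ => 0
  | fuel + 1, i =>
    if i < N then
      if (match skip with | some s => s == (i : Int) | none => false) then
        symA_loop p skip N fuel (i + 1)
      else if (List.range (min i (N - i))).all
          (fun j => p.getD (i - j - 1) "" == p.getD (i + j) "") then
        (i : Int)
      else
        symA_loop p skip N fuel (i + 1)
    else 0

def symmetry (p : List String) (skip : Option Int) : Int :=
  symA_loop p skip p.length p.length 1

-- ===== PORT B =====
-- while i - k - 1 >= 0 and i + k < N and p[i-k-1] == p[i+k]: k += 1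
-- (Python's int test 'i - k - 1 >= 0' is 'k + 1 ≤ i' over Nat)
def symB_extend (p : List String) (N i : Nat) : Nat → Nat → Nat
  | 0, k => k
  | fuel + 1, k =>
    if k + 1 ≤ i ∧ i + k < N ∧ p.getD (i - k - 1) "" = p.getD (i + k) "" then
      symB_extend p N i fuel (k + 1)
    else k

-- first loop of Source B: builds rad; state (rad, c, r), i goes 1 .. N-1
-- (the index 2*c - i in Python is nonnegative whenever the i < r branch runs)
def symB_scan (p : List String) (N : Nat) : Nat → List Nat → Nat → Nat → Nat → List Nat
  | 0, rad, _, _, _ => rad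
  | fuel + 1, rad, c, r, i =>
    if i < N then
      let k0 := if i < r then min (rad.getD (2 * c - i) 0) (r - i) else 0
      let k := symB_extend p N i N k0
      let rad' := rad.set i k
      if r < i + k then symB_scan p N fuel rad' i (i + k) (i + 1)
      else symB_scan p N fuel rad' c r (i + 1)
    else rad

-- second loop of Source B: first admissible i with rad[i] >= min(i, N-i)
def symB_find (rad : List Nat) (skip : Option Int) (N : Nat) : Nat → Nat → Int
  | 0, _ => 0
  | fuel + 1, i =>
    if i < N then
      if (match skip with | some s => s == (i : Int) | none => false) then
        symB_find rad skip N fuel (i + 1)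
      else if min i (N - i) ≤ rad.getD i 0 then
        (i : Int)
      else
        symB_find rad skip N fuel (i + 1)
    else 0

def symmetry_alt (p : List String) (skip : Option Int) : Int :=
  let N := p.length
  symB_find (symB_scan p N N (List.replicate (N + 1) 0) 0 0 1) skip N N 1

-- ===== PRECONDITION & SPEC =====
def Spec_symmetry (p : List String) (skip : Option Int) (out : Int) : Prop := out = symmetry_alt p skip
instance (p : List String) (skip : Option Int) (out : Int) : Decidable (Spec_symmetry p skip out) := by unfold Spec_symmetry; infer_instance

-- ===== CLAIM (what is proved, stated in full; the proofs are below) =====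
def Claim_equal_symmetry : Prop := ∀ (p : List String) (skip : Option Int), Dom_symmetry p skip → Spec_symmetry p skip (symmetry p skip)

-- ===== LEMMAS AND PROOFS =====

/-- row pair (i-j-1, i+j) matches -/
def MatchAt (p : List String) (i j : Nat) : Prop :=
  p.getD (i - j - 1) "" = p.getD (i + j) ""

/-- reflection across boundary `i` is exact to depth `k` -/
def GoodR (p : List String) (i k : Nat) : Prop := ∀ j, j < k → MatchAt p i j

theorem goodR_zero (p : List String) (i : Nat) : GoodR p i 0 := by
  intro j hj; omega

/-- any pair symmetric about boundary c within radius is equal -/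
theorem pal_pair (p : List String) (c R a b : Nat) (h : GoodR p c R)
    (hab : a + b + 1 = 2 * c) (hb1 : c ≤ b) (hb2 : b < c + R) :
    p.getD a "" = p.getD b "" := by
  have hm := h (b - c) (by omega)
  unfold MatchAt at hm
  have h1 : c - (b - c) - 1 = a := by omega
  have h2 : c + (b - c) = b := by omega
  rw [h1, h2] at hm
  exact hm

/-- the Manacher mirror argument: the mirrored radius is a valid lower bound -/
theorem mirror (p : List String) (c r i kj : Nat) (hci : c < i) (hir : i < r)
    (hr2c : r ≤ 2 * c) (hpal : GoodR p c (r - c)) (hkj : kj ≤ 2 * c - i)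
    (hgj : GoodR p (2 * c - i) kj) : GoodR p i (min kj (r - i)) := by
  intro j' hj'
  have hj'kj : j' < kj := lt_of_lt_of_le hj' (min_le_left _ _)
  have hj'r : j' < r - i := lt_of_lt_of_le hj' (min_le_right _ _)
  have hj'j : j' < 2 * c - i := lt_of_lt_of_le hj'kj hkj
  have s1 : p.getD (2 * c - i - j' - 1) "" = p.getD (i + j') "" :=
    pal_pair p c (r - c) _ _ hpal (by omega) (by omega) (by omega)
  have s2 : p.getD (2 * c - i - j' - 1) "" = p.getD (2 * c - i + j') "" :=
    hgj j' hj'kj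
  have s3 : p.getD (i - j' - 1) "" = p.getD (2 * c - i + j') "" := by
    by_cases hbc : c ≤ 2 * c - i + j'
    · exact pal_pair p c (r - c) (i - j' - 1) (2 * c - i + j') hpal
        (by omega) hbc (by omega)
    · exact (pal_pair p c (r - c) (2 * c - i + j') (i - j' - 1) hpal
        (by omega) (by omega) (by omega)).symm
  show p.getD (i - j' - 1) "" = p.getD (i + j') ""
  rw [s3, ← s2, s1]

/-- the while loop computes the exact reflection depth, starting from a valid lower bound -/
theorem extend_spec (p : List String) (N i : Nat) :
    ∀ fuel k, N ≤ k + fuel → k ≤ min i (N - i) → GoodR p i k →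
      GoodR p i (symB_extend p N i fuel k) ∧ k ≤ symB_extend p N i fuel k ∧
      symB_extend p N i fuel k ≤ min i (N - i) ∧
      (symB_extend p N i fuel k = min i (N - i) ∨ ¬ MatchAt p i (symB_extend p N i fuel k)) := by
  intro fuel
  induction fuel with
  | zero =>
    intro k hd hk hg
    simp only [symB_extend]
    refine ⟨hg, le_refl _, hk, ?_⟩
    left; omega
  | succ d ih =>
    intro k hd hk hg
    simp only [symB_extend]
    by_cases hc : k + 1 ≤ i ∧ i + k < N ∧ p.getD (i - k - 1) "" = p.getD (i + k) ""
    · rw [if_pos hc]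
      have hg' : GoodR p i (k + 1) := by
        intro j hj
        by_cases hjk : j < k
        · exact hg j hjk
        · have : j = k := by omega
          subst this; exact hc.2.2
      have := ih (k + 1) (by omega) (by omega) hg'
      exact ⟨this.1, by have := this.2.1; omega, this.2.2⟩
    · rw [if_neg hc]
      refine ⟨hg, le_refl _, hk, ?_⟩
      by_cases hkm : k = min i (N - i)
      · left; exact hkm
      · right
        intro hmatch
        exact hc ⟨by omega, by omega, hmatch⟩

theorem getD_set_nat (l : List Nat) (i t k : Nat) (hi : i < l.length) :
    (l.set i k).getD t 0 = if t = i then k else l.getD t 0 := by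
  by_cases h : t = i
  · subst h
    simp [List.getD, hi]
  · simp only [List.getD, List.getElem?_set]
    rw [if_neg (fun e => h e.symm), if_neg h]

/-- invariant of the scan loop: the final table holds exact reflection depths -/
theorem scan_spec (p : List String) (N : Nat) :
    ∀ fuel i c r rad, N ≤ i + fuel →
      1 ≤ i → c < i → r ≤ 2 * c → r ≤ N → GoodR p c (r - c) →
      rad.length = N + 1 →
      (∀ t, GoodR p t (rad.getD t 0) ∧ rad.getD t 0 ≤ min t (N - t)) →
      (∀ t, 1 ≤ t → t < i → (rad.getD t 0 = min t (N - t) ∨ ¬ MatchAt p t (rad.getD t 0))) →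
      ∀ t, 1 ≤ t → t < N →
        GoodR p t ((symB_scan p N fuel rad c r i).getD t 0) ∧
        (symB_scan p N fuel rad c r i).getD t 0 ≤ min t (N - t) ∧
        ((symB_scan p N fuel rad c r i).getD t 0 = min t (N - t) ∨
          ¬ MatchAt p t ((symB_scan p N fuel rad c r i).getD t 0)) := by
  intro fuel
  induction fuel with
  | zero =>
    intro i c r rad hd h1 hci hr2c hrN hpal hlen hI1 hI2 t ht1 htN
    simp only [symB_scan]
    exact ⟨(hI1 t).1, (hI1 t).2, hI2 t ht1 (by omega)⟩
  | succ d ih =>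
    intro i c r rad hd h1 hci hr2c hrN hpal hlen hI1 hI2 t ht1 htN
    simp only [symB_scan]
    by_cases hiN : i < N
    · rw [if_pos hiN]
      set k0 := if i < r then min (rad.getD (2 * c - i) 0) (r - i) else 0 with hk0def
      have hk0 : GoodR p i k0 ∧ k0 ≤ min i (N - i) := by
        rw [hk0def]
        by_cases hir : i < r
        · simp only [hir, if_true]
          have hkj := (hI1 (2 * c - i)).2
          refine ⟨mirror p c r i _ hci hir hr2c hpal (le_trans hkj (min_le_left _ _))
            (hI1 (2 * c - i)).1, ?_⟩
          have h2ci : 2 * c - i < i := by omega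
          have := min_le_left (rad.getD (2 * c - i) 0) (r - i)
          have := min_le_right (rad.getD (2 * c - i) 0) (r - i)
          omega
        · simp only [hir, if_false]
          exact ⟨goodR_zero p i, by omega⟩
      set k := symB_extend p N i N k0 with hkdef
      have hk := extend_spec p N i N k0 (by omega) hk0.2 hk0.1
      rw [← hkdef] at hk
      have hset : ∀ t', (rad.set i k).getD t' 0 = if t' = i then k else rad.getD t' 0 :=
        fun t' => getD_set_nat rad i t' k (by omega)
      have hlen' : (rad.set i k).length = N + 1 := by simp [hlen]
      have hI1' : ∀ t', GoodR p t' ((rad.set i k).getD t' 0) ∧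
          (rad.set i k).getD t' 0 ≤ min t' (N - t') := by
        intro t'
        rw [hset t']
        by_cases h : t' = i
        · subst h; simp only [if_true]; exact ⟨hk.1, hk.2.2.1⟩
        · simp only [h, if_false]; exact hI1 t'
      have hI2' : ∀ t', 1 ≤ t' → t' < i + 1 →
          ((rad.set i k).getD t' 0 = min t' (N - t') ∨
            ¬ MatchAt p t' ((rad.set i k).getD t' 0)) := by
        intro t' ht'1 ht'2
        rw [hset t']
        by_cases h : t' = i
        · subst h; simp only [if_true]; exact hk.2.2.2
        · simp only [h, if_false]; exact hI2 t' ht'1 (by omega)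
      by_cases hri : r < i + k
      · rw [if_pos hri]
        refine ih (i + 1) i (i + k) (rad.set i k) (by omega) (by omega) (by omega)
          (by have := hk.2.2.1; have := min_le_left i (N - i); omega)
          (by have := hk.2.2.1; have := min_le_right i (N - i); omega)
          (by simpa using hk.1) hlen' hI1' hI2' t ht1 htN
      · rw [if_neg hri]
        exact ih (i + 1) c r (rad.set i k) (by omega) (by omega) (by omega)
          hr2c hrN hpal hlen' hI1' hI2' t ht1 htN
    · rw [if_neg hiN]
      exact ⟨(hI1 t).1, (hI1 t).2, hI2 t ht1 (by omega)⟩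

/-- characterisation: the stored depth certifies the full reflection iff A's check succeeds -/
theorem char_iff (p : List String) (N t v : Nat) (hg : GoodR p t v) (hle : v ≤ min t (N - t))
    (hmax : v = min t (N - t) ∨ ¬ MatchAt p t v) :
    (min t (N - t) ≤ v ↔ GoodR p t (min t (N - t))) := by
  constructor
  · intro h
    have : v = min t (N - t) := by omega
    rw [← this]; exact hg
  · intro hgm
    by_contra h
    rcases hmax with hm | hm
    · omega
    · exact hm (hgm v (by omega))

theorem checkA_iff (p : List String) (N t : Nat) :
    ((List.range (min t (N - t))).all
      (fun j => p.getD (t - j - 1) "" == p.getD (t + j) "") = true) ↔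
    GoodR p t (min t (N - t)) := by
  simp only [List.all_eq_true, List.mem_range, beq_iff_eq]
  constructor
  · intro h j hj; exact h j hj
  · intro h j hj; exact h j hj

/-- the two selection loops agree when the per-axis conditions agree -/
theorem loops_eq (p : List String) (skip : Option Int) (N : Nat) (rad : List Nat)
    (h : ∀ t, 1 ≤ t → t < N →
      (((List.range (min t (N - t))).all
        (fun j => p.getD (t - j - 1) "" == p.getD (t + j) "") = true) ↔
        min t (N - t) ≤ rad.getD t 0)) :
    ∀ fuel i, N ≤ i + fuel → 1 ≤ i →
      symA_loop p skip N fuel i = symB_find rad skip N fuel i := by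
  intro fuel
  induction fuel with
  | zero =>
    intro i hd h1
    simp only [symA_loop, symB_find]
  | succ d ih =>
    intro i hd h1
    simp only [symA_loop, symB_find]
    by_cases hiN : i < N
    · rw [if_pos hiN, if_pos hiN]
      generalize (match skip with | some s => s == (i : Int) | none => false) = b
      cases b with
      | true =>
        rw [if_pos rfl, if_pos rfl]
        exact ih (i + 1) (by omega) (by omega)
      | false =>
        simp only [Bool.false_eq_true, if_false]
        by_cases hcond : min i (N - i) ≤ rad.getD i 0
        · rw [if_pos ((h i h1 hiN).2 hcond), if_pos hcond]
        · rw [if_neg (fun hc => hcond ((h i h1 hiN).1 hc)), if_neg hcond]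
          exact ih (i + 1) (by omega) (by omega)
    · rw [if_neg hiN, if_neg hiN]

theorem getD_replicate_zero (N t : Nat) : (List.replicate (N + 1) (0 : Nat)).getD t 0 = 0 := by
  unfold List.getD
  by_cases h : t < N + 1
  · simp [h]
  · have h2 : (List.replicate (N + 1) (0 : Nat))[t]? = none :=
      List.getElem?_eq_none (by simp; omega)
    simp [h2]

-- ===== VERDICT (by name: the statement is the Claim_ definition above) =====
theorem symmetry_spec : Claim_equal_symmetry := by
  unfold Claim_equal_symmetry
  intro p skip _
  unfold Spec_symmetry symmetry symmetry_alt
  set N := p.length with hN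
  have hrad := scan_spec p N N 1 0 0 (List.replicate (N + 1) 0) (by omega) (by omega)
    (by omega) (by omega) (by omega) (goodR_zero p 0) (by simp)
    (fun t => by rw [getD_replicate_zero]; exact ⟨goodR_zero p t, by omega⟩)
    (fun t ht1 ht2 => by omega)
  apply loops_eq p skip N _ _ N 1 (by omega) (by omega)
  intro t ht1 htN
  have h := hrad t ht1 htN
  rw [checkA_iff]
  exact (char_iff p N t _ h.1 h.2.1 h.2.2).symm
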